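-- pv_equiv track=rewrite | github.com/ioivo/CS61A | discussion/disc06.py | partition_gen
-- ===== SOURCE A (Python) =====
-- def partition_gen(n, m):
--     """Yield the partitions of n using parts up to size m."""
--     assert n >= 0 and m >= 0
--     # 基本情况：正好凑成 n
--     if n == 0:
--         yield ''   # 表示已经完成划分，空字符串作为后续拼接的基底
--         return
--     # 如果没有可用的部件且 n > 0，则无解（什么也不 yield）
--     if m == 0:
--         return
--
--     # 1) 不使用 m，尝试用更小的部件
--     for p in partition_gen(n, m - 1):
--         yield p
--
--     # 2) 使用 m（前提 n >= m），继续拆剩余的 n-m（仍允许使用 m）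
--     if n >= m:
--         for p in partition_gen(n - m, m):
--             if p:               # 子划分非空，前面加上 "m + "
--                 yield f"{m} + {p}"
--             else:               # 子划分是空字符串，说明这是最后一个元素
--                 yield str(m)
-- ===== SOURCE B (Python) =====
-- def _parts(n, m):
--     """Yield each partition of n (parts up to m) as a list of ints, largest part first."""
--     if n == 0:
--         yield []
--         return
--     for k in range(1, min(n, m) + 1):
--         for rest in _parts(n - k, k):
--             yield [k] + rest
--
--
-- def partition_gen(n, m):
--     """Yield the partitions of n using parts up to size m."""
--     assert n >= 0 and m >= 0
--     for parts in _parts(n, m):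
--         yield " + ".join(str(x) for x in parts)
-- ===== Notes on version B (the rewrite author's own statement) =====
-- stated objective: alternative
-- what changed: Replaces A's include/exclude-m binary recursion over strings with a two-stage design: a largest-part-first enumerator that yields each partition as a list of ints (choosing the largest part k = 1..min(n,m) ascending and recursing on parts up to k), followed by a separate formatting pass that joins each list with ' + '.
import Mathlib
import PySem

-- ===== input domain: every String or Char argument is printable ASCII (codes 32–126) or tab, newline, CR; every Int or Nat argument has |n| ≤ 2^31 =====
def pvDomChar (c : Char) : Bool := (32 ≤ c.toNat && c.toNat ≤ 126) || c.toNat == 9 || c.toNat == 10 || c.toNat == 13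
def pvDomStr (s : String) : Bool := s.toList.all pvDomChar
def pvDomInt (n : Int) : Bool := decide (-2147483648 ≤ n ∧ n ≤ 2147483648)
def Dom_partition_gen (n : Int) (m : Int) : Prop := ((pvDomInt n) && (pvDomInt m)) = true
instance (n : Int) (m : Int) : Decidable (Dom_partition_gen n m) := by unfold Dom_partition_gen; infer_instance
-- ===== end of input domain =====

-- B replaces A's include/exclude-m string recursion by a two-stage design: enumerate each
-- partition as a list of ints via largest-part recursion, then join with " + " (objective: alternative).

-- ===== PORT A =====
-- A's recursion, on Nat (Pre_ guarantees n ≥ 0 and m ≥ 0, where this is exact):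
-- branch order as in the Python: n == 0 base, m == 0 base, the "without m" loop, then the "use m" loop.
def pvPartA : Nat → Nat → List String
  | 0, _ => [""]                        -- if n == 0: yield ''
  | _ + 1, 0 => []                      -- if m == 0: return
  | n + 1, m + 1 =>
      pvPartA (n + 1) m ++              -- for p in partition_gen(n, m - 1): yield p
      (if n + 1 ≥ m + 1 then            -- if n >= m:
        (pvPartA (n + 1 - (m + 1)) (m + 1)).map (fun p =>
          if p ≠ "" then PySem.Int.toStr ((m : Int) + 1) ++ " + " ++ p
          else PySem.Int.toStr ((m : Int) + 1))
      else [])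
termination_by n m => (n, m)
decreasing_by
  · exact Prod.Lex.right (n + 1) (Nat.lt_succ_self m)
  · exact Prod.Lex.left _ _ (by omega)

def partition_gen (n : Int) (m : Int) : List String := pvPartA n.toNat m.toNat

-- ===== PORT B =====
-- stage 1 (_parts): each partition of n with parts up to m, as a list of ints, largest first.
def pvParts : Nat → Nat → List (List Nat)
  | 0, _ => [[]]                        -- if n == 0: yield []
  | n + 1, m =>
      (List.range (min (n + 1) m)).flatMap (fun j =>
        (pvParts (n - j) (j + 1)).map (fun rest => (j + 1) :: rest))
termination_by n _ => n
decreasing_by omega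

-- stage 2: " + ".join(str(x) for x in parts)
def pvFmt (p : List Nat) : String :=
  PySem.Str.join " + " (p.map (fun x : Nat => PySem.Int.toStr (x : Int)))

def partition_gen_alt (n : Int) (m : Int) : List String :=
  (pvParts n.toNat m.toNat).map pvFmt

-- ===== PRECONDITION & SPEC =====
-- Pre_ excludes exactly the inputs on which A's `assert n >= 0 and m >= 0` raises AssertionError.
def Pre_partition_gen (n : Int) (m : Int) : Prop := 0 ≤ n ∧ 0 ≤ m
instance (n : Int) (m : Int) : Decidable (Pre_partition_gen n m) := by unfold Pre_partition_gen; infer_instance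
def pvWitness_partition_gen : Int × Int := (6, 4)

def Spec_partition_gen (n : Int) (m : Int) (out : List String) : Prop := out = partition_gen_alt n m
instance (n : Int) (m : Int) (out : List String) : Decidable (Spec_partition_gen n m out) := by unfold Spec_partition_gen; infer_instance

-- ===== CLAIM (what is proved, stated in full; the proofs are below) =====
def Claim_equal_partition_gen : Prop := ∀ (n : Int) (m : Int), Dom_partition_gen n m → Pre_partition_gen n m → Spec_partition_gen n m (partition_gen n m)

-- ===== LEMMAS AND PROOFS =====

-- str(x) is never the empty string.
theorem pvToDigitsCore_ne_nil (fuel n : Nat) (ds : List Char) (h : ds ≠ []) :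
    Nat.toDigitsCore 10 fuel n ds ≠ [] := by
  induction fuel generalizing n ds with
  | zero => simpa [Nat.toDigitsCore]
  | succ f ih =>
    simp only [Nat.toDigitsCore]
    split
    · simp
    · exact ih _ _ (by simp)

theorem pvToDigits_ne_nil (n : Nat) : Nat.toDigits 10 n ≠ [] := by
  unfold Nat.toDigits
  simp only [Nat.toDigitsCore]
  split
  · simp
  · exact pvToDigitsCore_ne_nil _ _ _ (by simp)

theorem pvStrExt (s t : String) (h : s.toList = t.toList) : s = t := by
  rw [← @String.ofList_toList s, ← @String.ofList_toList t, h]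

theorem pvToStr_ne_empty (x : Int) : PySem.Int.toStr x ≠ "" := by
  intro h
  have h' : (PySem.Int.toStr x).toList = [] := by rw [h]; rfl
  rw [PySem.Int.toList_toStr] at h'
  unfold PySem.Int.toChars at h'
  split at h'
  · simp at h'
  · exact pvToDigits_ne_nil _ h'

theorem pvFmt_nil : pvFmt [] = "" := rfl

theorem pvFmt_ne_empty (p : List Nat) (h : p ≠ []) : pvFmt p ≠ "" := by
  match p with
  | [a] =>
    have heq : pvFmt [a] = PySem.Int.toStr (a : Int) := by
      apply pvStrExt
      unfold pvFmt
      rw [PySem.Str.toList_join]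
      simp [PySem.Chars.join_singleton]
    rw [heq]; exact pvToStr_ne_empty _
  | a :: b :: t =>
    intro hc
    have h' := congrArg String.toList hc
    unfold pvFmt at h'
    rw [PySem.Str.toList_join] at h'
    simp only [List.map_cons] at h'
    rw [PySem.Chars.join_cons_cons] at h'
    simp at h'

-- formatting a cons reproduces A's per-element string builder.
theorem pvFmt_cons (k : Nat) (p : List Nat) :
    pvFmt (k :: p) =
      (if pvFmt p ≠ "" then PySem.Int.toStr (k : Int) ++ " + " ++ pvFmt p
       else PySem.Int.toStr (k : Int)) := by
  match p with
  | [] =>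
    rw [if_neg (by simp [pvFmt_nil])]
    apply pvStrExt
    unfold pvFmt
    rw [PySem.Str.toList_join]
    simp [PySem.Chars.join_singleton]
  | a :: t =>
    rw [if_pos (pvFmt_ne_empty _ (by simp))]
    apply pvStrExt
    unfold pvFmt
    rw [PySem.Str.toList_join]
    simp only [List.map_cons]
    rw [PySem.Chars.join_cons_cons]
    rw [String.toList_append, String.toList_append, PySem.Str.toList_join]
    simp

-- A's result, re-expressed grouped by largest part j+1.
theorem pvPartA_flat : ∀ (m n : Nat),
    pvPartA (n + 1) m = (List.range (min (n + 1) m)).flatMap (fun j =>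
      (pvPartA (n - j) (j + 1)).map (fun rest =>
        if rest ≠ "" then PySem.Int.toStr ((j : Int) + 1) ++ " + " ++ rest
        else PySem.Int.toStr ((j : Int) + 1))) := by
  intro m
  induction m with
  | zero => intro n; simp [pvPartA]
  | succ m ih =>
    intro n
    rw [pvPartA]
    by_cases h : m + 1 ≤ n + 1
    · have hmin : min (n + 1) (m + 1) = m + 1 := by omega
      have hmin' : min (n + 1) m = m := by omega
      rw [if_pos h, hmin, List.range_succ, List.flatMap_append, ih n, hmin']
      simp
    · have hmin : min (n + 1) (m + 1) = n + 1 := by omega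
      have hmin' : min (n + 1) m = n + 1 := by omega
      rw [if_neg h, hmin, ih n, hmin', List.append_nil]

theorem pvPart_eq : ∀ (n m : Nat), pvPartA n m = (pvParts n m).map pvFmt := by
  intro n
  induction n using Nat.strong_induction_on with
  | _ n ih =>
    intro m
    match n with
    | 0 => simp [pvPartA, pvParts, pvFmt_nil]
    | Nat.succ n =>
      rw [pvPartA_flat, pvParts, List.map_flatMap]
      congr 1
      funext j
      rw [ih (n - j) (by omega) (j + 1), List.map_map, List.map_map]
      congr 1
      funext rest
      simp only [Function.comp]
      rw [pvFmt_cons]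
      push_cast
      rfl

-- ===== VERDICT (by name: the statement is the Claim_ definition above) =====
theorem partition_gen_spec : Claim_equal_partition_gen := by
  intro n m _ _
  unfold Spec_partition_gen partition_gen partition_gen_alt
  exact pvPart_eq n.toNat m.toNat
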